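-- pv_equiv track=rewrite | github.com/Phoenexus22/A.L.I.N.A_Transpiler_Prototype | Src/compiler.py | remcomments
-- ===== SOURCE A (Python) =====
-- def remcomments(input):
--     spl = input.split("`")
--     if (len(spl)%2==0):
--         raise Exception("SyntaxError: Comment Character (`) without partner")
--     output = ""
--     i = 0
--     while i < len(spl):
--         output+=spl[i]
--         i+=2
--     return output
-- ===== SOURCE B (Python) =====
-- def remcomments(input):
--     output = []
--     inside = False
--     for ch in input:
--         if ch == '`':
--             inside = not inside
--         elif not inside:
--             output.append(ch)
--     if inside:
--         raise Exception("SyntaxError: Comment Character (`) without partner")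
--     return "".join(output)
-- ===== Notes on version B (the rewrite author's own statement) =====
-- stated objective: idiomatic
-- what changed: Replaced the split-on-backtick list plus an index-stepping while loop by a single character pass with an inside-comment flag; the unmatched-backtick error becomes the flag still being set at the end.
import Mathlib
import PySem

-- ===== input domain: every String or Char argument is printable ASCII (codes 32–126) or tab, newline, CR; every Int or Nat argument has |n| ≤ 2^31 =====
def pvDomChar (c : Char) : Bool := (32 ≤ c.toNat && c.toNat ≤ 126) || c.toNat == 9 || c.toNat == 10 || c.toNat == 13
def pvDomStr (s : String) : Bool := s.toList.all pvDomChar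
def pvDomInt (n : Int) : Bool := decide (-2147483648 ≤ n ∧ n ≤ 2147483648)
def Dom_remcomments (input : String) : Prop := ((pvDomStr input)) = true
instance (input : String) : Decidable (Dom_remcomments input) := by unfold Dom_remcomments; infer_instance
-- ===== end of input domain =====

-- B replaces A's split-on-backtick + index-stepping while loop by a single character scan with an inside-comment flag (idiomatic, same behaviour incl. the unmatched-backtick error).


-- ===== PORT A =====
-- while i < len(spl): output += spl[i]; i += 2
def remAloop (spl : List (List Char)) (i : Nat) (output : List Char) : List Char :=
  if h : i < spl.length then remAloop spl (i + 2) (output ++ spl[i]) else output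
termination_by spl.length - i

def remcomments (input : String) : String :=
  -- spl = input.split("`"); if len(spl) % 2 == 0: raise Exception(...)  (excluded by Pre_remcomments)
  String.ofList (remAloop (PySem.Chars.splitOn input.toList ['`']) 0 [])

-- ===== PORT B =====
def remcomments_alt (input : String) : String :=
  -- fold state = (output, inside); Python's final 'if inside: raise …' is excluded by Pre_remcomments
  String.ofList (input.toList.foldl
    (fun (st : List Char × Bool) ch =>
      if ch = '`' then (st.1, !st.2)
      else if !st.2 then (st.1 ++ [ch], st.2)
      else st)
    ([], false)).1

-- ===== PRECONDITION & SPEC =====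
-- A (and B) raise on a string containing an odd number of backticks; Pre_ admits exactly the even-count strings.
def Pre_remcomments (input : String) : Prop := PySem.Str.count input "`" % 2 = 0
instance (input : String) : Decidable (Pre_remcomments input) := by unfold Pre_remcomments; infer_instance
def pvWitness_remcomments : String := "a`comment`b"

def Spec_remcomments (input : String) (out : String) : Prop := out = remcomments_alt input
instance (input : String) (out : String) : Decidable (Spec_remcomments input out) := by unfold Spec_remcomments; infer_instance

-- ===== CLAIM (what is proved, stated in full; the proofs are below) =====
def Claim_equal_remcomments : Prop := ∀ (input : String), Dom_remcomments input → Pre_remcomments input → Spec_remcomments input (remcomments input)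

-- ===== LEMMAS AND PROOFS =====

-- spec-side recursion for the split: accumulate the current piece `pre`
def splitParts (pre : List Char) : List Char → List (List Char)
  | [] => [pre]
  | c :: cs => if c = '`' then pre :: splitParts [] cs else splitParts (pre ++ [c]) cs

-- concatenation of every other piece, starting with (b = true) or skipping (b = false) the head
def pick : Bool → List (List Char) → List Char
  | _, [] => []
  | b, p :: ps => (if b then p else []) ++ pick (!b) ps

-- B's scan as a plain recursion: b = inside-comment flag
def gscan : Bool → List Char → List Char
  | _, [] => []
  | b, c :: cs => if c = '`' then gscan (!b) cs else if b then gscan b cs else c :: gscan b cs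

lemma splitOn_go_spec (l : List Char) : ∀ (fuel : Nat) (cur : List Char) (acc : List (List Char)),
    l.length < fuel →
    PySem.Chars.splitOn.go ['`'] fuel l cur acc = acc.reverse ++ splitParts cur.reverse l := by
  induction l with
  | nil =>
      intro fuel cur acc h
      match fuel, h with
      | fuel + 1, _ => simp [PySem.Chars.splitOn.go, splitParts]
  | cons c rest ih =>
      intro fuel cur acc h
      match fuel, h with
      | fuel + 1, h =>
        by_cases hc : c = '`'
        · subst hc
          rw [PySem.Chars.splitOn.go]
          simp only [List.isPrefixOf, beq_self_eq_true, Bool.true_and, if_true]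
          simp only [List.length_cons, List.length_nil, List.drop_succ_cons, List.drop_zero]
          rw [ih fuel [] (cur.reverse :: acc) (by simp at h; omega)]
          simp [splitParts]
        · rw [PySem.Chars.splitOn.go]
          have hpre : List.isPrefixOf ['`'] (c :: rest) = false := by
            simp [List.isPrefixOf]; intro h'; exact absurd h'.symm hc
          rw [if_neg (by rw [hpre]; simp)]
          rw [ih fuel (c :: cur) acc (by simp at h; omega)]
          simp [splitParts, hc]

lemma splitOn_eq_splitParts (cs : List Char) :
    PySem.Chars.splitOn cs ['`'] = splitParts [] cs := by
  unfold PySem.Chars.splitOn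
  rw [splitOn_go_spec cs (cs.length + 1) [] [] (by omega)]
  simp

lemma pick_false_cons_eq (ps : List (List Char)) :
    pick false ps = (if _h : ps = [] then [] else pick true ps.tail) := by
  cases ps <;> simp [pick]

lemma remAloop_eq_pick (spl : List (List Char)) : ∀ (i : Nat) (out : List Char),
    remAloop spl i out = out ++ pick true (spl.drop i) := by
  intro i
  induction hn : spl.length - i using Nat.strong_induction_on generalizing i with
  | _ n ih =>
    intro out
    rw [remAloop]
    by_cases h : i < spl.length
    · rw [dif_pos h]
      have hdrop : spl.drop i = spl[i] :: spl.drop (i + 1) := List.drop_eq_getElem_cons h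
      rw [ih (spl.length - (i + 2)) (by omega) (i + 2) rfl]
      rw [hdrop]
      simp only [pick, if_true, Bool.not_true, List.append_assoc]
      congr 2
      rw [pick_false_cons_eq]
      by_cases h2 : spl.drop (i + 1) = []
      · rw [dif_pos h2]
        have : spl.drop (i + 2) = [] := by
          have := congrArg List.length h2
          simp at this
          apply List.drop_eq_nil_of_le; omega
        rw [this]; rfl
      · rw [dif_neg h2, ← List.tail_drop]
    · rw [dif_neg h]
      have : spl.drop i = [] := List.drop_eq_nil_of_le (by omega)
      simp [this, pick]

lemma pick_splitParts (cs : List Char) : ∀ (pre : List Char),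
    pick true (splitParts pre cs) = pre ++ gscan false cs ∧
    pick false (splitParts pre cs) = gscan true cs := by
  induction cs with
  | nil => intro pre; simp [splitParts, pick, gscan]
  | cons c cs ih =>
      intro pre
      by_cases hc : c = '`'
      · subst hc
        constructor
        · simp only [splitParts]
          simp [pick, gscan, (ih []).2]
        · simp only [splitParts]
          simp [pick, gscan, (ih []).1]
      · simp only [splitParts, if_neg hc, gscan]
        constructor
        · rw [(ih (pre ++ [c])).1]
          simp
        · rw [(ih (pre ++ [c])).2]
          simp

lemma foldl_scan_eq_gscan (cs : List Char) : ∀ (acc : List Char) (b : Bool),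
    (cs.foldl
      (fun (st : List Char × Bool) ch =>
        if ch = '`' then (st.1, !st.2)
        else if !st.2 then (st.1 ++ [ch], st.2)
        else st)
      (acc, b)).1 = acc ++ gscan b cs := by
  induction cs with
  | nil => intro acc b; simp [gscan]
  | cons c cs ih =>
      intro acc b
      by_cases hc : c = '`'
      · subst hc
        rw [List.foldl_cons]
        exact (ih acc (!b)).trans (by simp [gscan])
      · cases b
        · simp only [List.foldl_cons, if_neg hc, Bool.not_false, if_true, ih]
          simp [gscan, hc]
        · simp only [List.foldl_cons, if_neg hc, Bool.not_true, Bool.false_eq_true, if_false, ih]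
          simp [gscan, hc]

-- ===== VERDICT (by name: the statement is the Claim_ definition above) =====
theorem remcomments_spec : Claim_equal_remcomments := by
  intro input _ _
  unfold Spec_remcomments remcomments remcomments_alt
  rw [foldl_scan_eq_gscan, remAloop_eq_pick, splitOn_eq_splitParts]
  have := (pick_splitParts input.toList []).1
  simp [this]
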